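-- pv_equiv track=rewrite | github.com/valbart/strengthofgraphs | strengh.py | possible_edges_to_add
-- ===== SOURCE A (Python) =====
-- def possible_edges_to_add(G):
--     N = len(G)
--     possible_edges = []
--     for i in range(N):
--         for j in range(i+1, N):
--             if not (j in G[i]):
--                 possible_edges.append([i,j])
--     return possible_edges
-- ===== SOURCE B (Python) =====
-- def possible_edges_to_add(G):
--     # Two-pointer merge: scan the sorted, deduplicated neighbor row in lockstep
--     # with the candidate range i+1..N-1, emitting each candidate the pointer skips.
--     N = len(G)
--     out = []
--     for i, row in enumerate(G):
--         s = sorted(set(row))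
--         k = 0
--         for j in range(i + 1, N):
--             while k < len(s) and s[k] < j:
--                 k += 1
--             if k < len(s) and s[k] == j:
--                 k += 1
--             else:
--                 out.append([i, j])
--     return out
-- ===== Notes on version B (the rewrite author's own statement) =====
-- stated objective: faster
-- what changed: Replaces the per-pair list-membership inner test by a two-pointer merge: each row is deduplicated and sorted once, then a single pointer advances through it in lockstep with the candidate range i+1..N-1, emitting every candidate the pointer does not match.
import Mathlib
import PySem

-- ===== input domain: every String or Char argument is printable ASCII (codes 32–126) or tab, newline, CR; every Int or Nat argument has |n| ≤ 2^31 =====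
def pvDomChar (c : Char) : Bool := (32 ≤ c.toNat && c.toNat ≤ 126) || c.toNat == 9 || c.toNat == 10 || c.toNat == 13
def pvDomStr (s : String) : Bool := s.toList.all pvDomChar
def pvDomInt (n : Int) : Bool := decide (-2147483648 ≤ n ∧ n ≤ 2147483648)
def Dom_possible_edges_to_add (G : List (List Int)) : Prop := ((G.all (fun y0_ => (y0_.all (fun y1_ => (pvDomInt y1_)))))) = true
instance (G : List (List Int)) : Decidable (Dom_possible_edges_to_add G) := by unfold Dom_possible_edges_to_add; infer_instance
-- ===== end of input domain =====

-- B replaces the per-pair list-membership test by a two-pointer merge of each sorted,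
-- deduplicated row against the candidate range (faster mechanism; same return value).

-- ===== PORT A =====
def possible_edges_to_add (G : List (List Int)) : List (List Int) :=
  let N : Int := PySem.List.len G
  (PySem.List.pyRange 0 N 1).foldl (fun possible_edges i =>
    (PySem.List.pyRange (i + 1) N 1).foldl (fun possible_edges j =>
      if !((PySem.List.pyGetD G i []).contains j) then possible_edges ++ [[i, j]]
      else possible_edges) possible_edges) []

-- ===== PORT B =====
-- 'while k < len(s) and s[k] < j: k += 1'
def pvAdvance (s : List Int) (j : Int) (k : Nat) : Nat :=
  if h : k < s.length then
    if s[k] < j then pvAdvance s j (k + 1) else k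
  else k
termination_by s.length - k

-- body of B's inner 'for j' loop, over the state (k, out)
def pvRowStep (s : List Int) (i : Int) (st : Nat × List (List Int)) (j : Int) :
    Nat × List (List Int) :=
  let k := pvAdvance s j st.1
  if h : k < s.length then
    if s[k] = j then (k + 1, st.2) else (k, st.2 ++ [[i, j]])
  else (k, st.2 ++ [[i, j]])

def possible_edges_to_add_alt (G : List (List Int)) : List (List Int) :=
  let N : Int := PySem.List.len G
  (PySem.List.enumerate G 0).foldl (fun out p =>
    let s := PySem.List.sorted (PySem.Set.ofList p.2) (fun x => x) false
    ((PySem.List.pyRange (p.1 + 1) N 1).foldl (pvRowStep s p.1) (0, out)).2) []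

-- ===== PRECONDITION & SPEC =====
def Spec_possible_edges_to_add (G : List (List Int)) (out : List (List Int)) : Prop := out = possible_edges_to_add_alt G
instance (G : List (List Int)) (out : List (List Int)) : Decidable (Spec_possible_edges_to_add G out) := by unfold Spec_possible_edges_to_add; infer_instance

-- ===== CLAIM (what is proved, stated in full; the proofs are below) =====
def Claim_equal_possible_edges_to_add : Prop := ∀ (G : List (List Int)), Dom_possible_edges_to_add G → Spec_possible_edges_to_add G (possible_edges_to_add G)

-- ===== LEMMAS AND PROOFS =====
theorem pvAdvance_below (s : List Int) (j : Int) (k : Nat)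
    (hk : ∀ m (_ : m < s.length), m < k → s[m] < j) :
    ∀ m (_ : m < s.length), m < pvAdvance s j k → s[m] < j := by
  unfold pvAdvance
  split
  · split
    · rename_i hlen hlt
      exact pvAdvance_below s j (k + 1) (by
        intro m hm hmk
        rcases Nat.lt_succ_iff_lt_or_eq.mp hmk with h | h
        · exact hk m hm h
        · subst h; exact hlt)
    · exact hk
  · exact hk
termination_by s.length - k

theorem pvAdvance_not_lt (s : List Int) (j : Int) (k : Nat) :
    ∀ (_ : pvAdvance s j k < s.length), ¬ s[pvAdvance s j k] < j := by
  unfold pvAdvance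
  split
  · split
    · exact pvAdvance_not_lt s j (k + 1)
    · rename_i h2
      intro _
      exact h2
  · rename_i h1
    intro h
    exact absurd h h1
termination_by s.length - k

-- if the advanced pointer does not sit on j, then j is not in the strictly sorted s
theorem not_mem_of_advance (s : List Int) (hs : s.Pairwise (· < ·)) (j : Int) (k : Nat)
    (hk : ∀ m (_ : m < s.length), m < pvAdvance s j k → s[m] < j)
    (hne : ¬ (∃ h : pvAdvance s j k < s.length, s[pvAdvance s j k] = j)) :
    j ∉ s := by
  intro hmem
  obtain ⟨m, hm, hj⟩ := List.getElem_of_mem hmem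
  set k' := pvAdvance s j k with hk'
  rcases Nat.lt_trichotomy m k' with h | h | h
  · exact absurd (hj ▸ hk m hm h) (lt_irrefl _)
  · exact hne ⟨h ▸ hm, by simp only [← h]; exact hj⟩
  · have hkl : k' < s.length := lt_trans h hm
    have h2 := (List.pairwise_iff_getElem.mp hs) k' m hkl hm h
    rw [hj] at h2
    exact pvAdvance_not_lt s j k hkl h2

-- the invariant of B's inner loop
theorem row_loop (s : List Int) (hs : s.Pairwise (· < ·)) (i b : Int) :
    ∀ (a : Int) (k : Nat) (acc : List (List Int)),
    (∀ m (_ : m < s.length), m < k → s[m] < a) →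
    ((PySem.List.pyRange a b 1).foldl (pvRowStep s i) (k, acc)).2
      = acc ++ ((PySem.List.pyRange a b 1).filter (fun j => !s.contains j)).map
          (fun j => [i, j]) := by
  intro a
  by_cases hab : a < b
  case neg =>
    intro k acc _
    rw [PySem.List.pyRange_one_eq_nil (by omega)]
    simp
  case pos =>
    intro k acc hinv
    rw [PySem.List.pyRange_one_cons hab]
    simp only [List.foldl_cons, List.filter_cons]
    have hbel := pvAdvance_below s a k hinv
    set k' := pvAdvance s a k with hk'
    by_cases hhit : ∃ h : k' < s.length, s[k'] = a
    · obtain ⟨hlen, heq⟩ := hhit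
      have hmem : a ∈ s := heq ▸ List.getElem_mem hlen
      have hstep : pvRowStep s i (k, acc) a = (k' + 1, acc) := by
        simp [pvRowStep, ← hk', hlen, heq]
      rw [hstep]
      rw [row_loop s hs i b (a + 1) (k' + 1) acc (by
        intro m hm hmk
        rcases Nat.lt_succ_iff_lt_or_eq.mp hmk with h | h
        · exact lt_trans (hbel m hm h) (by omega)
        · subst h; rw [heq]; omega)]
      simp [hmem]
    · have hnm : a ∉ s := not_mem_of_advance s hs a k hbel hhit
      have hstep : pvRowStep s i (k, acc) a = (k', acc ++ [[i, a]]) := by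
        by_cases hlen : k' < s.length
        · have hne : s[k'] ≠ a := fun h => hhit ⟨hlen, h⟩
          simp [pvRowStep, ← hk', hlen, hne]
        · simp [pvRowStep, ← hk', hlen]
      rw [hstep]
      rw [row_loop s hs i b (a + 1) k' (acc ++ [[i, a]]) (by
        intro m hm hmk
        exact lt_trans (hbel m hm hmk) (by omega))]
      simp [hnm]
termination_by a => (b - a).toNat
decreasing_by all_goals omega

-- ===== VERDICT (by name: the statement is the Claim_ definition above) =====
theorem possible_edges_to_add_spec : Claim_equal_possible_edges_to_add := by
  intro G _
  unfold Spec_possible_edges_to_add possible_edges_to_add possible_edges_to_add_alt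
  rw [PySem.List.enumerate_eq_map_pyRange G [], List.foldl_map]
  dsimp only
  congr 1
  funext acc i
  rw [PySem.List.foldl_append_if (fun j => !((PySem.List.pyGetD G i []).contains j))
        (fun j => [i, j])]
  rw [row_loop _ (PySem.List.sorted_ofList_pairwise_lt _) i _ (i + 1) 0 acc
        (by intro m hm hmk; omega)]
  congr 2
  apply List.filter_congr
  intro j _
  have : (PySem.List.sorted (PySem.Set.ofList (PySem.List.pyGetD G i []))
      (fun x => x) false).contains j = (PySem.List.pyGetD G i []).contains j := by
    simp
  rw [this]
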